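-- pv_equiv track=rewrite | github.com/Krissuper11/Python | KT/kt2/exam.py | take_partial
-- ===== SOURCE A (Python) =====
-- def take_partial(text: str, leave_count: int, take_count: int) -> str:
--     """
--     Take only part of the string.
--
--     Ignore first leave_count symbols, then use next take_count symbols.
--     Repeat the process until the end of the string.
--
--     The following conditions are met (you don't have to check those):
--     leave_count >= 0
--     take_count >= 0
--     leave_count + take_count > 0
--
--     take_partial("abcdef", 2, 3) => "cde"
--     take_partial("abcdef", 0, 1) => "abcdef"
--     take_partial("abcdef", 1, 0) => ""
--     """
--     string = ""
--     leave_c = leave_count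
--     take_c = take_count
--     for element in text:
--         if leave_count > 0:
--             leave_count -= 1
--             continue
--         elif leave_count == 0 and take_count != 0 or leave_c == 0:
--             string += element
--             take_count -= 1
--         elif leave_count <= 0 and take_count == 0:
--             leave_count = leave_c - 1
--             take_count = take_c
--     return string
-- ===== SOURCE B (Python) =====
-- def take_partial(text: str, leave_count: int, take_count: int) -> str:
--     period = leave_count + take_count
--     return "".join(c for i, c in enumerate(text) if i % period >= leave_count)
-- ===== Notes on version B (the rewrite author's own statement) =====
-- stated objective: simpler
-- what changed: Replaces A's three-branch skip/take/reset counter machine (with its leave_c==0 special branch) by a stateless positional test: compute period = leave_count + take_count once and keep the character at index i exactly when i % period >= leave_count.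
-- intended difference: On inputs that violate the docstring's stated precondition (a negative leave_count or take_count, with enough text to reach the difference) A's dead counter state returns '' or a stale suffix of the text, while B applies its one positional rule uniformly; the docstring declares these inputs unspecified, so B's uniform value is the natural choice. — e.g. on take_partial("ab", -1, 2): A returns "", B returns "ab"
-- outside the precondition, e.g. on take_partial('abc', 0, 0): A returns 'abc', B raises ZeroDivisionError; on take_partial('abc', 1, -1): A returns 'bc', B raises ZeroDivisionError
import Mathlib
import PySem

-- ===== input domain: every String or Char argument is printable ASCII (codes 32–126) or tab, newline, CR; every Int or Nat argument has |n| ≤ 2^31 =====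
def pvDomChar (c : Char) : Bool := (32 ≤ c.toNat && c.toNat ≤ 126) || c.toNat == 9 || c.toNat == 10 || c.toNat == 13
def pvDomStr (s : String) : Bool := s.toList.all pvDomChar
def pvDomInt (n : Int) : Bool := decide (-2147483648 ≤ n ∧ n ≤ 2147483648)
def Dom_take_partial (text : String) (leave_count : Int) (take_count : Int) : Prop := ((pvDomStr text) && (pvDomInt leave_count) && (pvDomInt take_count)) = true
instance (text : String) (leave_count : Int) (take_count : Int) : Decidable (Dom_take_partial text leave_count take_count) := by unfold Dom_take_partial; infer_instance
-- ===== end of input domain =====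

-- B replaces A's stateful skip/take/reset counter machine by a stateless positional
-- filter (keep index i iff i % (leave_count+take_count) >= leave_count); same output
-- on the documented domain, with a stated difference on contract-violating negative counts
-- (objective: simpler).

-- ===== PORT A =====
-- one loop iteration of A: state = (string, leave_count, take_count); leave_c/take_c are the saved originals
def takeLoop (leave_c take_c : Int) (st : List Char × Int × Int) (element : Char) : List Char × Int × Int :=
  if st.2.1 > 0 then (st.1, st.2.1 - 1, st.2.2)
  else if (st.2.1 = 0 ∧ st.2.2 ≠ 0) ∨ leave_c = 0 then (st.1 ++ [element], st.2.1, st.2.2 - 1)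
  else if st.2.1 ≤ 0 ∧ st.2.2 = 0 then (st.1, leave_c - 1, take_c)
  else st

def take_partial (text : String) (leave_count : Int) (take_count : Int) : String :=
  String.ofList (text.toList.foldl (takeLoop leave_count take_count) ([], leave_count, take_count)).1

-- ===== PORT B =====
def take_partial_alt (text : String) (leave_count : Int) (take_count : Int) : String :=
  let period := leave_count + take_count
  String.ofList ((PySem.List.enumerate text.toList).filterMap
    (fun ic => if PySem.Int.mod ic.1 period ≥ leave_count then some ic.2 else none))

-- ===== PRECONDITION & SPEC =====
-- Pre_ excludes only the inputs where B raises ZeroDivisionError: a nonempty text with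
-- leave_count + take_count == 0 (A returns the whole text for (0,0) and a dead-state
-- suffix/'' otherwise there).
def Pre_take_partial (text : String) (leave_count : Int) (take_count : Int) : Prop :=
  text.toList = [] ∨ leave_count + take_count ≠ 0
instance (text : String) (leave_count : Int) (take_count : Int) : Decidable (Pre_take_partial text leave_count take_count) := by unfold Pre_take_partial; infer_instance

def pvWitness_take_partial : String × Int × Int := ("abcdef", 2, 3)

-- On inputs violating the docstring's precondition (a negative count, with enough text to reach
-- the difference) A's dead counter state returns '' or a stale suffix, while B applies the one
-- positional rule uniformly; the docstring declares these inputs unspecified, so B's uniform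
-- value is the natural choice.
def D_take_partial (text : String) (leave_count : Int) (take_count : Int) : Prop :=
  (leave_count < 0 ∧ text.toList ≠ []) ∨
  (leave_count = 0 ∧ take_count ≤ -2 ∧ 2 ≤ text.toList.length) ∨
  (0 < leave_count ∧ take_count < 0 ∧ leave_count < (text.toList.length : Int))
instance (text : String) (leave_count : Int) (take_count : Int) : Decidable (D_take_partial text leave_count take_count) := by unfold D_take_partial; infer_instance

def Spec_take_partial (text : String) (leave_count : Int) (take_count : Int) (out : String) : Prop := ¬ D_take_partial text leave_count take_count → out = take_partial_alt text leave_count take_count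
instance (text : String) (leave_count : Int) (take_count : Int) (out : String) : Decidable (Spec_take_partial text leave_count take_count out) := by unfold Spec_take_partial; infer_instance

def pvDiffWitness_take_partial : String × Int × Int := ("ab", -1, 2)
def pvDiffWitnessOut_take_partial : String × String := ("", "ab")

-- ===== CLAIM (what is proved, stated in full; the proofs are below) =====
def Claim_unchanged_take_partial : Prop := ∀ (text : String) (leave_count : Int) (take_count : Int), Dom_take_partial text leave_count take_count → Pre_take_partial text leave_count take_count → Spec_take_partial text leave_count take_count (take_partial text leave_count take_count)
def Claim_changed_take_partial : Prop := Dom_take_partial (pvDiffWitness_take_partial.1) (pvDiffWitness_take_partial.2.1) (pvDiffWitness_take_partial.2.2) ∧ Pre_take_partial (pvDiffWitness_take_partial.1) (pvDiffWitness_take_partial.2.1) (pvDiffWitness_take_partial.2.2) ∧ D_take_partial (pvDiffWitness_take_partial.1) (pvDiffWitness_take_partial.2.1) (pvDiffWitness_take_partial.2.2) ∧ take_partial (pvDiffWitness_take_partial.1) (pvDiffWitness_take_partial.2.1) (pvDiffWitness_take_partial.2.2) = pvDiffWitnessOut_take_partial.1 ∧ take_partial_alt (pvDiffWitness_take_partial.1)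 (pvDiffWitness_take_partial.2.1) (pvDiffWitness_take_partial.2.2) = pvDiffWitnessOut_take_partial.2 ∧ pvDiffWitnessOut_take_partial.1 ≠ pvDiffWitnessOut_take_partial.2
def Claim_exact_take_partial : Prop := ∀ (text : String) (leave_count : Int) (take_count : Int), Dom_take_partial text leave_count take_count → Pre_take_partial text leave_count take_count → D_take_partial text leave_count take_count → take_partial text leave_count take_count ≠ take_partial_alt text leave_count take_count

-- ===== LEMMAS AND PROOFS =====

-- the characters B keeps, written as a recursion over the list with a running index
def keepFrom (l p : Int) (i : Int) : List Char → List Char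
  | [] => []
  | c :: cs => if l ≤ PySem.Int.mod i p then c :: keepFrom l p (i + 1) cs else keepFrom l p (i + 1) cs

-- B's enumerate/filterMap pass computes keepFrom
theorem filterMap_enumerate_eq_keepFrom (l p : Int) :
    ∀ (cs : List Char) (s : Int),
      (PySem.List.enumerate cs s).filterMap
        (fun ic => if PySem.Int.mod ic.1 p ≥ l then some ic.2 else none) = keepFrom l p s cs := by
  intro cs
  induction cs with
  | nil => intro s; simp [PySem.List.enumerate_nil, keepFrom]
  | cons c cs ih =>
      intro s
      rw [PySem.List.enumerate_cons]
      by_cases h : l ≤ PySem.Int.mod s p <;>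
        simp [h, keepFrom, ih (s + 1)]

-- when the positional test always passes, B keeps everything
theorem keepFrom_all (l p : Int) (h : ∀ i : Int, l ≤ PySem.Int.mod i p) :
    ∀ (cs : List Char) (i : Int), keepFrom l p i cs = cs := by
  intro cs
  induction cs with
  | nil => intro i; simp [keepFrom]
  | cons c cs ih => intro i; simp [keepFrom, h i, ih]

-- when the positional test never passes, B keeps nothing
theorem keepFrom_none (l p : Int) (h : ∀ i : Int, ¬ l ≤ PySem.Int.mod i p) :
    ∀ (cs : List Char) (i : Int), keepFrom l p i cs = [] := by
  intro cs
  induction cs with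
  | nil => intro i; simp [keepFrom]
  | cons c cs ih => intro i; simp [keepFrom, h i, ih]

-- A with leave_count == 0: the 'or leave_c == 0' branch appends every character
theorem loopA_zero (take_c : Int) :
    ∀ (cs acc : List Char) (tc : Int),
      (cs.foldl (takeLoop 0 take_c) (acc, 0, tc)).1 = acc ++ cs := by
  intro cs
  induction cs with
  | nil => intro acc tc; simp
  | cons c cs ih =>
      intro acc tc
      have hstep : takeLoop 0 take_c (acc, 0, tc) c = (acc ++ [c], 0, tc - 1) := by
        simp [takeLoop]
      rw [List.foldl_cons, hstep, ih]
      simp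

-- A skips every character while the list is no longer than the leave counter
theorem loopA_skip (l t : Int) :
    ∀ (cs : List Char) (lc tc : Int) (acc : List Char),
      (cs.length : Int) ≤ lc → (cs.foldl (takeLoop l t) (acc, lc, tc)).1 = acc := by
  intro cs
  induction cs with
  | nil => intro lc tc acc _; simp
  | cons c cs ih =>
      intro lc tc acc hlen
      have hpos : lc > 0 := by
        have : ((c :: cs).length : Int) = (cs.length : Int) + 1 := by push_cast [List.length_cons]; ring
        omega
      have hstep : takeLoop l t (acc, lc, tc) c = (acc, lc - 1, tc) := by
        show (if lc > 0 then _ else _) = _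
        rw [if_pos hpos]
      rw [List.foldl_cons, hstep]
      refine ih (lc - 1) tc acc ?_
      have : ((c :: cs).length : Int) = (cs.length : Int) + 1 := by push_cast [List.length_cons]; ring
      omega

-- stepping a floor-mod index: (i+1) % p from i % p
theorem emod_succ (i p : Int) (hp : 0 < p) :
    (i + 1) % p = if i % p = p - 1 then 0 else i % p + 1 := by
  have h0 : 0 ≤ i % p := Int.emod_nonneg i (by omega)
  have h1 : i % p < p := Int.emod_lt_of_pos i hp
  have key : (i + 1) % p = (i % p + 1) % p := by
    conv_lhs => rw [← Int.mul_ediv_add_emod i p]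
    rw [show p * (i / p) + i % p + 1 = (i % p + 1) + p * (i / p) by ring]
    rw [Int.add_mul_emod_self_left]
  rw [key]
  split_ifs with h
  · rw [h, show p - 1 + 1 = p by ring, Int.emod_self]
  · exact Int.emod_eq_of_lt (by omega) (by omega)

-- A with leave_count > 0: the loop state at index i is a function of i % (l+t),
-- and the characters appended are exactly those keepFrom keeps
theorem loopA_pos (l t : Int) (hl : 0 < l) (ht : 0 ≤ t) :
    ∀ (cs : List Char) (i lc tc : Int) (acc : List Char),
      0 ≤ i →
      ((i = 0 ∧ lc = l ∧ tc = t) ∨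
       (0 < i ∧ i % (l + t) = 0 ∧ lc = 0 ∧ tc = 0) ∨
       (0 < i % (l + t) ∧ i % (l + t) < l ∧ lc = l - i % (l + t) ∧ tc = t) ∨
       (l ≤ i % (l + t) ∧ lc = 0 ∧ tc = t - (i % (l + t) - l))) →
      (cs.foldl (takeLoop l t) (acc, lc, tc)).1 = acc ++ keepFrom l (l + t) i cs := by
  intro cs
  induction cs with
  | nil => intro i lc tc acc _ _; simp [keepFrom]
  | cons c cs ih =>
      intro i lc tc acc hi hst
      have hp : 0 < l + t := by omega
      have hlne : ¬ l = 0 := by omega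
      have hmod : PySem.Int.mod i (l + t) = i % (l + t) := PySem.Int.mod_eq_emod_of_pos hp
      have hmnn : 0 ≤ i % (l + t) := Int.emod_nonneg i (by omega)
      have hmlt : i % (l + t) < l + t := Int.emod_lt_of_pos i hp
      have hsucc : (i + 1) % (l + t) =
          if i % (l + t) = l + t - 1 then 0 else i % (l + t) + 1 := emod_succ i (l + t) hp
      rcases hst with ⟨h0, hlc, htc⟩ | ⟨hipos, hr, hlc, htc⟩ | ⟨hr1, hr2, hlc, htc⟩ | ⟨hr, hlc, htc⟩
      · -- i = 0, state (l, t): skip branch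
        have hr0 : i % (l + t) = 0 := by rw [h0, Int.zero_emod]
        have hstep : takeLoop l t (acc, lc, tc) c = (acc, l - 1, t) := by
          rw [hlc, htc]; simp [takeLoop, hl]
        rw [List.foldl_cons, hstep, keepFrom, hmod]
        rw [if_neg (by omega)]
        refine ih (i + 1) (l - 1) t acc (by omega) ?_
        rw [hsucc]
        split_ifs at * with h <;> omega
      · -- i > 0, i % p = 0, state (0, 0): reset branch, char consumed, not kept
        have hstep : takeLoop l t (acc, lc, tc) c = (acc, l - 1, t) := by
          rw [hlc, htc]; simp [takeLoop, hlne]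
        rw [List.foldl_cons, hstep, keepFrom, hmod]
        rw [if_neg (by omega)]
        refine ih (i + 1) (l - 1) t acc (by omega) ?_
        rw [hsucc]
        split_ifs at * with h <;> omega
      · -- 0 < i % p < l, state (l - r, t): skip branch
        have hstep : takeLoop l t (acc, lc, tc) c = (acc, l - i % (l + t) - 1, t) := by
          rw [hlc, htc]
          show (if l - i % (l + t) > 0 then _ else _) = _
          rw [if_pos (show l - i % (l + t) > 0 by omega)]
        rw [List.foldl_cons, hstep, keepFrom, hmod]
        rw [if_neg (by omega)]
        refine ih (i + 1) (l - i % (l + t) - 1) t acc (by omega) ?_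
        rw [hsucc]
        split_ifs at * with h <;> omega
      · -- l ≤ i % p, state (0, t - (r - l)): append branch
        have hstep : takeLoop l t (acc, lc, tc) c =
            (acc ++ [c], 0, t - (i % (l + t) - l) - 1) := by
          rw [hlc, htc]; simp [takeLoop, show t - (i % (l + t) - l) ≠ 0 by omega]
        rw [List.foldl_cons, hstep, keepFrom, hmod]
        rw [if_pos (by omega)]
        rw [ih (i + 1) 0 (t - (i % (l + t) - l) - 1) (acc ++ [c]) (by omega)
          (by rw [hsucc]; split_ifs at * with h <;> omega)]
        simp

-- lists differing as lists differ as strings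
theorem ofList_ne (xs ys : List Char) (h : xs ≠ ys) : String.ofList xs ≠ String.ofList ys := by
  intro he; apply h
  have := congrArg String.toList he
  simpa using this

-- B never keeps more characters than the text has
theorem keepFrom_length_le (l p : Int) :
    ∀ (cs : List Char) (i : Int), (keepFrom l p i cs).length ≤ cs.length := by
  intro cs
  induction cs with
  | nil => intro i; simp [keepFrom]
  | cons c cs ih =>
      intro i
      rw [keepFrom]
      split_ifs
      · simpa using ih (i + 1)
      · exact Nat.le_succ_of_le (ih (i + 1))

-- A with a negative leave counter: no branch ever appends
theorem loopA_neg (l t : Int) (hl : l < 0) :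
    ∀ (cs : List Char) (lc tc : Int) (acc : List Char),
      lc < 0 → ((t ≠ 0 ∧ tc = t) ∨ (t = 0 ∧ tc = 0)) →
      (cs.foldl (takeLoop l t) (acc, lc, tc)).1 = acc := by
  intro cs
  induction cs with
  | nil => intro lc tc acc _ _; simp
  | cons c cs ih =>
      intro lc tc acc hlc hinv
      have hstep : takeLoop l t (acc, lc, tc) c =
          (if lc ≤ 0 ∧ tc = 0 then (acc, l - 1, t) else (acc, lc, tc)) := by
        simp only [takeLoop]
        rw [if_neg (by omega), if_neg (by rintro (⟨h1, _⟩ | h2) <;> omega)]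
      rcases hinv with ⟨htne, htc⟩ | ⟨ht0, htc0⟩
      · rw [List.foldl_cons, hstep, if_neg (by rintro ⟨_, h⟩; exact htne (htc ▸ h))]
        exact ih lc tc acc hlc (Or.inl ⟨htne, htc⟩)
      · rw [List.foldl_cons, hstep, if_pos ⟨by omega, htc0⟩]
        exact ih (l - 1) t acc (by omega) (Or.inr ⟨ht0, ht0⟩)

-- A with leave counter 0 and a negative take counter: the take branch appends everything
theorem loopA_negtake (l t : Int) :
    ∀ (cs : List Char) (tc : Int) (acc : List Char),
      tc < 0 → (cs.foldl (takeLoop l t) (acc, 0, tc)).1 = acc ++ cs := by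
  intro cs
  induction cs with
  | nil => intro tc acc _; simp
  | cons c cs ih =>
      intro tc acc htc
      have hstep : takeLoop l t (acc, 0, tc) c = (acc ++ [c], 0, tc - 1) := by
        simp only [takeLoop]
        rw [if_neg (by omega), if_pos (Or.inl ⟨trivial, by omega⟩)]
      rw [List.foldl_cons, hstep, ih (tc - 1) (acc ++ [c]) (by omega)]
      simp

-- A with a positive leave counter and negative take counter: skip l characters, append the rest
theorem loopA_skiptake (l t : Int) (ht : t < 0) :
    ∀ (cs : List Char) (lc : Int) (acc : List Char),
      0 ≤ lc → (cs.foldl (takeLoop l t) (acc, lc, t)).1 = acc ++ cs.drop lc.toNat := by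
  intro cs
  induction cs with
  | nil => intro lc acc _; simp
  | cons c cs ih =>
      intro lc acc hlc
      rcases eq_or_lt_of_le hlc with hlc0 | hlcpos
      · rw [← hlc0]
        rw [loopA_negtake l t (c :: cs) t acc ht]
        simp
      · have hstep : takeLoop l t (acc, lc, t) c = (acc, lc - 1, t) := by
          show (if lc > 0 then _ else _) = _
          rw [if_pos hlcpos]
        rw [List.foldl_cons, hstep, ih (lc - 1) acc (by omega)]
        have : lc.toNat = (lc - 1).toNat + 1 := by omega
        rw [this, List.drop_succ_cons]

-- ===== VERDICT (by name: the statement is the Claim_ definition above) =====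
theorem take_partial_spec : Claim_unchanged_take_partial := by
  intro text l t _ hpre hnd
  unfold D_take_partial at hnd
  push Not at hnd
  obtain ⟨hD1, hD2, hD3⟩ := hnd
  simp only [take_partial, take_partial_alt]
  rw [filterMap_enumerate_eq_keepFrom]
  rcases lt_trichotomy l 0 with hl | hl | hl
  · -- leave_count < 0: outside D only with empty text
    have hnil := hD1 hl
    simp [hnil, keepFrom]
  · -- leave_count = 0
    subst hl
    rcases lt_trichotomy t 0 with ht | ht | ht
    · -- take_count < 0
      rcases (by omega : t = -1 ∨ t ≤ -2) with ht1 | ht2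
      · -- period = -1: i % -1 == 0, so B also keeps everything
        rw [keepFrom_all 0 (0 + t) (fun i => by
          have := PySem.Int.mod_neg_bounds i (show (0 : Int) + t < 0 by omega)
          omega)]
        rw [loopA_zero t text.toList [] t]
        simp
      · -- text has at most one character; both return it
        have hlen : text.toList.length ≤ 1 := by omega
        rw [loopA_zero t text.toList [] t]
        obtain ⟨c, hc⟩ | hnil : (∃ c, text.toList = [c]) ∨ text.toList = [] := by
          rcases hcs : text.toList with _ | ⟨c, _ | ⟨d, rest⟩⟩
          · right; rfl
          · left; exact ⟨c, rfl⟩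
          · rw [hcs] at hlen; simp at hlen
        · have hm0 : PySem.Int.mod 0 t = 0 :=
            (PySem.Int.mod_eq_zero_iff_dvd 0 t).mpr (dvd_zero _)
          rw [hc]
          simp [keepFrom, hm0]
        · rw [hnil]
          simp [keepFrom]
    · -- take_count = 0: Pre_ forces empty text
      rcases hpre with hnil | hne
      · simp [hnil, keepFrom]
      · omega
    · -- take_count > 0: B keeps everything too
      rw [keepFrom_all 0 (0 + t) (fun i => PySem.Int.mod_nonneg i (by omega))]
      rw [loopA_zero t text.toList [] t]
      simp
  · -- leave_count > 0
    rcases lt_trichotomy t 0 with ht | ht | ht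
    · -- take_count < 0: outside D text is at most l long; A skips it all, B keeps nothing
      rcases hpre with hnil | hpne
      · rw [hnil]; simp [keepFrom]
      · have hlen : (text.toList.length : Int) ≤ l := by have := hD3 hl ht; omega
        rw [loopA_skip l t text.toList l t [] hlen]
        rw [keepFrom_none l (l + t) (fun i => by
          rcases lt_trichotomy (l + t) 0 with hq | hq | hq
          · have := PySem.Int.mod_neg_bounds i hq; omega
          · exact absurd hq hpne
          · have h1 := PySem.Int.mod_lt i hq; omega)]
    · -- take_count = 0 (period = l > 0): the periodic invariant applies
      rw [loopA_pos l t hl (by omega) text.toList 0 l t [] (by omega) (Or.inl ⟨rfl, rfl, rfl⟩)]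
      simp
    · -- take_count > 0: the periodic invariant applies
      rw [loopA_pos l t hl (by omega) text.toList 0 l t [] (by omega) (Or.inl ⟨rfl, rfl, rfl⟩)]
      simp

theorem take_partial_changed : Claim_changed_take_partial := by
  unfold Claim_changed_take_partial; decide

theorem take_partial_tight : Claim_exact_take_partial := by
  intro text l t _ hpre hd
  simp only [take_partial, take_partial_alt]
  rw [filterMap_enumerate_eq_keepFrom]
  apply ofList_ne
  rcases hd with ⟨hl, hne⟩ | ⟨hl, ht, hlen⟩ | ⟨hl, ht, hlen⟩
  · -- leave_count < 0: A is '', B keeps the first character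
    rw [loopA_neg l t hl text.toList l t [] hl (by
      rcases eq_or_ne t 0 with h | h
      · exact Or.inr ⟨h, h⟩
      · exact Or.inl ⟨h, rfl⟩)]
    rcases hcs : text.toList with _ | ⟨c, rest⟩
    · exact absurd hcs hne
    · rw [keepFrom]
      have hm0 : PySem.Int.mod 0 (l + t) = 0 :=
        (PySem.Int.mod_eq_zero_iff_dvd 0 (l + t)).mpr (dvd_zero _)
      rw [if_pos (by rw [hm0]; omega)]
      simp
  · -- leave_count = 0, take_count ≤ -2: B drops the second character, A keeps all
    subst hl
    rw [loopA_zero t text.toList [] t, List.nil_append]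
    simp only [zero_add]
    rcases hcs : text.toList with _ | ⟨c0, _ | ⟨c1, rest⟩⟩
    · rw [hcs] at hlen; simp at hlen
    · rw [hcs] at hlen; simp at hlen
    · rw [keepFrom]
      have hm0 : PySem.Int.mod 0 t = 0 :=
        (PySem.Int.mod_eq_zero_iff_dvd 0 t).mpr (dvd_zero _)
      rw [if_pos (by rw [hm0])]
      rw [show (0 : Int) + 1 = 1 from by norm_num]
      rw [keepFrom]
      have hm1 : PySem.Int.mod 1 t < 0 := by
        have hb := PySem.Int.mod_neg_bounds 1 (show t < 0 by omega)
        rcases lt_or_eq_of_le hb.2 with h | h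
        · exact h
        · exfalso
          have hdvd : t ∣ 1 := (PySem.Int.mod_eq_zero_iff_dvd 1 t).mp h
          rcases Int.isUnit_iff.mp (isUnit_of_dvd_one hdvd) with h1 | h1 <;> omega
      rw [if_neg (by omega)]
      rw [show (1 : Int) + 1 = 2 from by norm_num]
      intro h
      have h2 : c1 :: rest = keepFrom 0 t 2 rest := (List.cons_eq_cons.mp h).2
      have h3 := congrArg List.length h2
      have h4 := keepFrom_length_le 0 t rest 2
      simp at h3
      omega
  · -- leave_count > 0, take_count < 0: A returns the suffix text[l:], B returns ''
    have hne : text.toList ≠ [] := by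
      intro h; rw [h] at hlen; simp at hlen; omega
    have hpne : l + t ≠ 0 := by
      rcases hpre with hnil | h
      · exact absurd hnil hne
      · exact h
    rw [loopA_skiptake l t ht text.toList l [] (by omega), List.nil_append]
    rw [keepFrom_none l (l + t) (fun i => by
      rcases lt_trichotomy (l + t) 0 with hq | hq | hq
      · have := PySem.Int.mod_neg_bounds i hq; omega
      · exact absurd hq hpne
      · have h1 := PySem.Int.mod_lt i hq; omega)]
    intro h
    have h2 := congrArg List.length h
    rw [List.length_drop] at h2
    simp only [List.length_nil] at h2
    omega
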